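-- pv_equiv track=rewrite | github.com/ls-kelvin/VideoCaption | video_pipeline/tasks/agibot.py | parse
-- ===== SOURCE A (Python) =====
-- from typing import Any, Dict, List
--
-- def parse(generated_text: str, sample: Dict[str, Any]) -> Dict[str, Any]:
--     # Split by numbered lines (robust parsing)
--     lines = generated_text.strip().split('\n')
--     captions = []
--     current_caption = ""
--     for line in lines:
--         line = line.strip()
--         if not line:
--             continue
--         # Check if line starts a new numbered item (e.g., "1.", "2.", ..., "10.")
--         if line[0].isdigit() and '.' in line.split()[0]:
--             if current_caption:
--                 captions.append(current_caption.strip())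
--             # Remove the number prefix
--             parts = line.split('.', 1)
--             if len(parts) > 1:
--                 current_caption = parts[1].strip()
--             else:
--                 current_caption = ""
--         else:
--             current_caption += " " + line
--
--     if current_caption:
--         captions.append(current_caption.strip())
--
--     # Ensure alignment with action_config
--     action_config = sample.get("label_info", {}).get("action_config", [])
--     expected_count = len(action_config)
--     if len(captions) != expected_count:
--         # Pad or truncate to match
--         captions = (captions + ["[Caption generation failed.]"] * expected_count)[:expected_count]
--
--     return {
--         "detailed_action_captions": captions  # List[str], aligned with action_config
--     }
-- ===== SOURCE B (Python) =====
-- from typing import Any, Dict, List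
--
--
-- def _is_header(line: str) -> bool:
--     return line[0].isdigit() and '.' in line.split()[0]
--
--
-- def _go(ls: List[str]) -> List[str]:
--     # Recursive descent: each call consumes one caption (a leading block or a
--     # numbered item plus its continuation lines up to the next header).
--     if not ls:
--         return []
--     k = 1
--     while k < len(ls) and not _is_header(ls[k]):
--         k += 1
--     first, conts, rest = ls[0], ls[1:k], ls[k:]
--     head = [first.split('.', 1)[1].strip()] if _is_header(first) else [first]
--     parts = [p for p in head if p] + conts
--     cap = ' '.join(parts)
--     return ([cap] if cap else []) + _go(rest)
--
--
-- def parse(generated_text: str, sample: Dict[str, Any]) -> Dict[str, Any]: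
--     lines = [s for s in (ln.strip() for ln in generated_text.strip().split('\n')) if s]
--     captions = _go(lines)
--     expected_count = len(sample.get("label_info", {}).get("action_config", []))
--     if len(captions) != expected_count:
--         captions = (captions + ["[Caption generation failed.]"] * expected_count)[:expected_count]
--     return {"detailed_action_captions": captions}
-- ===== Notes on version B (the rewrite author's own statement) =====
-- stated objective: alternative
-- what changed: Replaces A's single stateful line loop (a current_caption string buffer flushed on each header) with a recursive-descent parser over the pre-filtered stripped lines: each call scans ahead to the next header, renders one caption from that segment by space-joining its parts, and recurses on the remainder.
import Mathlib
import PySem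

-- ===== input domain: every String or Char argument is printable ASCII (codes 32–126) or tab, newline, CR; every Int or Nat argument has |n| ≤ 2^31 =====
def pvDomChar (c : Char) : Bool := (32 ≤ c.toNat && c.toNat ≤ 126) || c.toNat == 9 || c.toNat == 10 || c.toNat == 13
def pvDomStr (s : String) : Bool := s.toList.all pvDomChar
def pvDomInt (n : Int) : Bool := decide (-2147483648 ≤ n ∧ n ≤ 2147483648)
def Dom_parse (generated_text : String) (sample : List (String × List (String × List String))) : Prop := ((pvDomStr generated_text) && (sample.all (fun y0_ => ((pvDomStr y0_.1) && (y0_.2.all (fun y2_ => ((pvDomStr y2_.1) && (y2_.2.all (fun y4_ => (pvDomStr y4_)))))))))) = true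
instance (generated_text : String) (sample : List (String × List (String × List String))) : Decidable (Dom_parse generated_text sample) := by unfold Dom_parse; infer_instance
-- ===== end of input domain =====

-- B re-implements A as a recursive-descent parser over the pre-filtered stripped non-empty
-- lines (each call scans to the next header and renders one caption from that segment);
-- objective: alternative decomposition, same return value on every input.

-- shared helpers: literal ports of the Python expressions both programs contain
-- "line[0].isdigit() and '.' in line.split()[0]" (only applied to non-empty lines; headD is head there)
def pvIsHeader (line : List Char) : Bool :=
  PySem.Chars.isdigit (line.headD ' ') && PySem.Chars.isIn ['.'] ((PySem.Chars.split₀ line).headD [])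

def pvFail : List Char := ('[' :: "Caption generation failed.".toList) ++ [']']

-- the common tail: action_config lookup, pad/truncate, wrap in the result dict
def pvAlign (captions : List (List Char)) (sample : List (String × List (String × List String))) : List (String × List String) :=
  let labelInfo : List (String × List String) := PySem.Dict.getD ⟨sample⟩ "label_info" []
  let actionConfig : List String := PySem.Dict.getD ⟨labelInfo⟩ "action_config" []
  let expected := actionConfig.length
  let captions := if captions.length ≠ expected then (captions ++ List.replicate expected pvFail).take expected else captions
  [("detailed_action_captions", captions.map String.ofList)]

-- ===== PORT A =====
-- the loop body of A: strip, skip empty, header test, flush/extend current_caption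
def parseStepA (st : List (List Char) × List Char) (line0 : List Char) : List (List Char) × List Char :=
  let line := PySem.Chars.strip line0
  if line = [] then st
  else if pvIsHeader line then
    let captions := if st.2 ≠ [] then st.1 ++ [PySem.Chars.strip st.2] else st.1
    let parts := PySem.Chars.splitOnMax line ['.'] 1
    if 1 < parts.length then (captions, PySem.Chars.strip (parts.getD 1 []))
    else (captions, [])
  else (st.1, st.2 ++ (' ' :: line))

def parse (generated_text : String) (sample : List (String × List (String × List String))) : List (String × List String) :=
  let lines := PySem.Chars.splitOn (PySem.Chars.strip generated_text.toList) ['\n']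
  let st := lines.foldl parseStepA ([], [])
  let captions := if st.2 ≠ [] then st.1 ++ [PySem.Chars.strip st.2] else st.1
  pvAlign captions sample

-- ===== PORT B =====
-- "line.split('.', 1)[1].strip()" (Source B only applies it to header lines, where two parts exist)
def pvPrefix (line : List Char) : List Char :=
  PySem.Chars.strip ((PySem.Chars.splitOnMax line ['.'] 1).getD 1 [])

-- Source B's _go: the while-scan 'k = 1; while k < len(ls) and not _is_header(ls[k])' splitting
-- ls into (ls[0], ls[1:k], ls[k:]) is exactly the takeWhile/dropWhile split of the tail
def goB : List (List Char) → List (List Char)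
  | [] => []
  | first :: rest0 =>
    let conts := rest0.takeWhile (fun l => !pvIsHeader l)
    let rest := rest0.dropWhile (fun l => !pvIsHeader l)
    let head := if pvIsHeader first then [pvPrefix first] else [first]
    let parts := (head.filter (fun p => p ≠ [])) ++ conts
    let cap := PySem.Chars.join [' '] parts
    (if cap ≠ [] then [cap] else []) ++ goB rest
  termination_by l => l.length
  decreasing_by
    have := List.length_dropWhile_le (fun l => !pvIsHeader l) rest0
    simp only [List.length_cons]; omega

def parse_alt (generated_text : String) (sample : List (String × List (String × List String))) : List (String × List String) :=
  let lines := ((PySem.Chars.splitOn (PySem.Chars.strip generated_text.toList) ['\n']).map PySem.Chars.strip).filter (· ≠ [])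
  pvAlign (goB lines) sample

-- ===== PRECONDITION & SPEC =====
def Spec_parse (generated_text : String) (sample : List (String × List (String × List String))) (out : List (String × List String)) : Prop := out = parse_alt generated_text sample
instance (generated_text : String) (sample : List (String × List (String × List String))) (out : List (String × List String)) : Decidable (Spec_parse generated_text sample out) := by unfold Spec_parse; infer_instance

-- ===== CLAIM (what is proved, stated in full; the proofs are below) =====
def Claim_equal_parse : Prop := ∀ (generated_text : String) (sample : List (String × List (String × List String))), Dom_parse generated_text sample → Spec_parse generated_text sample (parse generated_text sample)

-- ===== LEMMAS AND PROOFS =====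

theorem dropWhile_headD (p : Char → Bool) (l : List Char) (h : l.dropWhile p ≠ []) :
    p ((l.dropWhile p).headD ' ') = false := by
  induction l with
  | nil => simp at h
  | cons c t ih =>
    by_cases hc : p c
    · simpa [List.dropWhile_cons, hc] using ih (by simpa [List.dropWhile_cons, hc] using h)
    · simp [hc]

theorem strip_of_clean1 (cs : List Char) (hne : cs ≠ [])
    (hh : PySem.Chars.isspace (cs.headD ' ') = false)
    (hl : PySem.Chars.isspace (cs.getLastD ' ') = false) : PySem.Chars.strip cs = cs := by
  obtain ⟨ys, a, rfl⟩ := List.eq_nil_or_concat cs |>.resolve_left hne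
  rw [List.concat_eq_append] at *
  have h1 : PySem.Chars.lstrip (ys ++ [a]) = ys ++ [a] := by
    cases ys with
    | nil => simp_all [PySem.Chars.lstrip]
    | cons c t => simp_all [PySem.Chars.lstrip]
  rw [PySem.Chars.strip, h1, PySem.Chars.rstrip]
  rw [List.reverse_append]
  simp only [List.reverse_cons, List.reverse_nil, List.nil_append, List.singleton_append]
  rw [List.dropWhile_cons]
  simp_all

-- strip output is clean or empty
theorem strip_clean1 (cs : List Char) :
    PySem.Chars.strip cs = [] ∨ (PySem.Chars.strip cs ≠ [] ∧
      PySem.Chars.isspace ((PySem.Chars.strip cs).headD ' ') = false ∧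
      PySem.Chars.isspace ((PySem.Chars.strip cs).getLastD ' ') = false) := by
  by_cases h : PySem.Chars.strip cs = []
  · exact Or.inl h
  right
  refine ⟨h, ?_, ?_⟩
  · rw [PySem.Chars.strip] at *
    set l := PySem.Chars.lstrip cs with hl
    have hhead : PySem.Chars.isspace (l.headD ' ') = false := by
      apply dropWhile_headD
      intro hnil
      rw [PySem.Chars.lstrip] at hl
      rw [← hl] at hnil
      simp [hnil, PySem.Chars.rstrip] at h
    have hpre : PySem.Chars.rstrip l <+: l := by
      rw [PySem.Chars.rstrip]
      have := List.dropWhile_suffix (l := l.reverse) (p := PySem.Chars.isspace)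
      have := List.reverse_prefix.mpr this
      simpa using this
    obtain ⟨t, ht⟩ := hpre
    cases hrl : PySem.Chars.rstrip l with
    | nil => simp [hrl] at h
    | cons x xs =>
      rw [hrl] at ht
      rw [← ht] at hhead
      simpa [hrl] using hhead
  · rw [PySem.Chars.strip, PySem.Chars.rstrip]
    set r := (PySem.Chars.lstrip cs).reverse.dropWhile PySem.Chars.isspace with hr
    have hrne : r ≠ [] := by
      intro hnil
      rw [PySem.Chars.strip, PySem.Chars.rstrip, ← hr, hnil] at h
      simp at h
    have h2 := dropWhile_headD PySem.Chars.isspace (PySem.Chars.lstrip cs).reverse (by rw [← hr]; exact hrne)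
    rw [← hr] at h2
    obtain ⟨x, xs, hx⟩ := List.exists_cons_of_ne_nil hrne
    rw [hx] at h2 ⊢
    simpa using h2

theorem strip_cons_space (cs : List Char) : PySem.Chars.strip (' ' :: cs) = PySem.Chars.strip cs := by
  rw [PySem.Chars.strip, PySem.Chars.strip, PySem.Chars.lstrip, PySem.Chars.lstrip, List.dropWhile_cons]
  have : PySem.Chars.isspace ' ' = true := by decide
  rw [this]
  simp

theorem getLastD_append' (xs ys : List Char) (d : Char) (h : ys ≠ []) :
    (xs ++ ys).getLastD d = ys.getLastD d := by
  obtain ⟨zs, a, rfl⟩ := List.eq_nil_or_concat ys |>.resolve_left h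
  rw [List.concat_eq_append, ← List.append_assoc, List.getLastD_concat, List.getLastD_concat]

def pvCur (g : List Char × List (List Char)) : List Char :=
  g.1 ++ (g.2.map (fun c => ' ' :: c)).flatten
def pvParts (g : List Char × List (List Char)) : List (List Char) :=
  (if g.1 ≠ [] then [g.1] else []) ++ g.2
def pvCleanP (cs : List Char) : Prop :=
  cs ≠ [] ∧ PySem.Chars.isspace (cs.headD ' ') = false ∧ PySem.Chars.isspace (cs.getLastD ' ') = false

theorem join_cons (q : List Char) (conts : List (List Char)) :
    PySem.Chars.join [' '] (q :: conts) = q ++ (conts.map (fun c => ' ' :: c)).flatten := by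
  induction conts generalizing q with
  | nil => simp [PySem.Chars.join_singleton]
  | cons c rest ih => rw [PySem.Chars.join_cons_cons, ih]; simp

theorem flatten_last (conts : List (List Char)) (hc : ∀ c ∈ conts, pvCleanP c) (X : List Char)
    (hlast : PySem.Chars.isspace (X.getLastD ' ') = false) :
    PySem.Chars.isspace ((X ++ (conts.map (fun c => ' ' :: c)).flatten).getLastD ' ') = false := by
  rcases List.eq_nil_or_concat conts with h | ⟨cs, c, rfl⟩
  · simpa [h] using hlast
  · have hcne : c ≠ [] := (hc c (by simp)).1
    have hcl : PySem.Chars.isspace (c.getLastD ' ') = false := (hc c (by simp)).2.2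
    rw [List.concat_eq_append, List.map_append, List.flatten_append, ← List.append_assoc]
    simp only [List.map_cons, List.map_nil, List.flatten_cons, List.flatten_nil, List.append_nil]
    have hsplit : (' ' :: c) = [' '] ++ c := rfl
    rw [hsplit, ← List.append_assoc, getLastD_append' _ c ' ' hcne]
    exact hcl

theorem cur_clean_pos (p : List Char) (conts : List (List Char)) (hp : pvCleanP p)
    (hc : ∀ c ∈ conts, pvCleanP c) : pvCleanP (pvCur (p, conts)) := by
  obtain ⟨hne, hh, hl⟩ := hp
  refine ⟨by simp [pvCur, hne], ?_, ?_⟩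
  · obtain ⟨x, xs, rfl⟩ := List.exists_cons_of_ne_nil hne
    simpa [pvCur] using hh
  · exact flatten_last conts hc p hl

theorem strip_cur (g : List Char × List (List Char)) (hp : g.1 = [] ∨ pvCleanP g.1)
    (hc : ∀ c ∈ g.2, pvCleanP c) :
    PySem.Chars.strip (pvCur g) = PySem.Chars.join [' '] (pvParts g) := by
  obtain ⟨p, conts⟩ := g
  rcases hp with hp | hp
  · subst hp
    induction conts with
    | nil => simp [pvCur, pvParts, PySem.Chars.join_nil]; decide
    | cons c rest ih =>
      have hcc := hc c (by simp)
      have : pvCur ([], c :: rest) = ' ' :: pvCur (c, rest) := by simp [pvCur]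
      rw [this, strip_cons_space]
      have h2 : PySem.Chars.strip (pvCur (c, rest)) = PySem.Chars.join [' '] (pvParts (c, rest)) := by
        rw [strip_of_clean1 _ (cur_clean_pos c rest hcc (fun x hx => hc x (by simp [hx]))).1
              (cur_clean_pos c rest hcc (fun x hx => hc x (by simp [hx]))).2.1
              (cur_clean_pos c rest hcc (fun x hx => hc x (by simp [hx]))).2.2]
        simp [pvParts, hcc.1, pvCur, join_cons]
      rw [h2]
      simp [pvParts, hcc.1]
  · have hcl := cur_clean_pos p conts hp (by exact hc)
    rw [strip_of_clean1 _ hcl.1 hcl.2.1 hcl.2.2]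
    simp [pvParts, hp.1, pvCur, join_cons]

theorem cur_eq_nil_iff (g : List Char × List (List Char)) (hc : ∀ c ∈ g.2, pvCleanP c) :
    pvCur g = [] ↔ pvParts g = [] := by
  obtain ⟨p, conts⟩ := g
  cases conts with
  | nil => by_cases hp : p = [] <;> simp [pvCur, pvParts, hp]
  | cons c rest =>
    have : c ≠ [] := (hc c (by simp)).1
    by_cases hp : p = [] <;> simp [pvCur, pvParts, hp]

def pvGroups (g : List Char × List (List Char)) : List (List Char) → List (List Char × List (List Char))
  | [] => [g]
  | l :: ls => if pvIsHeader l then g :: pvGroups (pvPrefix l, []) ls else pvGroups (g.1, g.2 ++ [l]) ls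
def pvRender (gs : List (List Char × List (List Char))) : List (List Char) :=
  (gs.filter (fun g => decide (pvParts g ≠ []))).map (fun g => PySem.Chars.join [' '] (pvParts g))
def pvFinish (st : List (List Char) × List Char) : List (List Char) :=
  if st.2 ≠ [] then st.1 ++ [PySem.Chars.strip st.2] else st.1

theorem render_cons (g : List Char × List (List Char)) (gs : List (List Char × List (List Char))) :
    pvRender (g :: gs) = pvRender [g] ++ pvRender gs := by
  by_cases h : pvParts g = [] <;> simp [pvRender, h]

theorem finish_cur (caps : List (List Char)) (g : List Char × List (List Char))
    (hp : g.1 = [] ∨ pvCleanP g.1) (hc : ∀ c ∈ g.2, pvCleanP c) :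
    (if pvCur g ≠ [] then caps ++ [PySem.Chars.strip (pvCur g)] else caps) = caps ++ pvRender [g] := by
  by_cases h : pvParts g = []
  · simp [pvRender, h, (cur_eq_nil_iff g hc).mpr h]
  · have hcur : pvCur g ≠ [] := fun hx => h ((cur_eq_nil_iff g hc).mp hx)
    simp [pvRender, h, hcur, strip_cur g hp hc]

theorem prefix_branch (l : List Char) :
    (if 1 < (PySem.Chars.splitOnMax l ['.'] 1).length then
       PySem.Chars.strip ((PySem.Chars.splitOnMax l ['.'] 1).getD 1 [])
     else []) = pvPrefix l := by
  by_cases h : 1 < (PySem.Chars.splitOnMax l ['.'] 1).length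
  · simp [h, pvPrefix]
  · rw [if_neg h, pvPrefix, List.getD_eq_default _ _ (by omega)]
    decide

theorem prefix_clean (l : List Char) : pvPrefix l = [] ∨ pvCleanP (pvPrefix l) :=
  strip_clean1 _

theorem main_inv (L : List (List Char)) (hL : ∀ l ∈ L, pvCleanP l) :
    ∀ (caps : List (List Char)) (g : List Char × List (List Char)),
      (g.1 = [] ∨ pvCleanP g.1) → (∀ c ∈ g.2, pvCleanP c) →
      pvFinish (L.foldl (fun st l =>
          if pvIsHeader l then
            ((if st.2 ≠ [] then st.1 ++ [PySem.Chars.strip st.2] else st.1),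
             if 1 < (PySem.Chars.splitOnMax l ['.'] 1).length then
               PySem.Chars.strip ((PySem.Chars.splitOnMax l ['.'] 1).getD 1 [])
             else [])
          else (st.1, st.2 ++ (' ' :: l))) (caps, pvCur g))
        = caps ++ pvRender (pvGroups g L) := by
  induction L with
  | nil =>
    intro caps g hp hc
    simp only [List.foldl_nil, pvFinish, pvGroups]
    exact finish_cur caps g hp hc
  | cons l ls ih =>
    intro caps g hp hc
    have hlc : pvCleanP l := hL l (by simp)
    have hL' : ∀ x ∈ ls, pvCleanP x := fun x hx => hL x (by simp [hx])
    rw [List.foldl_cons]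
    by_cases hh : pvIsHeader l = true
    · rw [if_pos hh, prefix_branch]
      have hcur : pvPrefix l = pvCur (pvPrefix l, []) := by simp [pvCur]
      rw [show ((if pvCur g ≠ [] then caps ++ [PySem.Chars.strip (pvCur g)] else caps),
            pvPrefix l) = (caps ++ pvRender [g], pvCur (pvPrefix l, [])) by
        rw [finish_cur caps g hp hc, ← hcur]]
      rw [ih hL' (caps ++ pvRender [g]) (pvPrefix l, []) (prefix_clean l) (by simp)]
      rw [pvGroups, if_pos hh, render_cons g]
      by_cases hg : pvParts g = [] <;> simp [pvRender, hg]
    · rw [if_neg hh]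
      have hsnoc : pvCur g ++ (' ' :: l) = pvCur (g.1, g.2 ++ [l]) := by
        simp [pvCur]
      rw [show ((caps, pvCur g).1, (caps, pvCur g).2 ++ (' ' :: l)) = (caps, pvCur (g.1, g.2 ++ [l])) by
        simpa using hsnoc]
      rw [ih hL' caps (g.1, g.2 ++ [l]) hp (by
        intro c hcm
        rcases List.mem_append.mp hcm with h1 | h1
        · exact hc c h1
        · simpa [List.mem_singleton.mp h1] using hlc)]
      have : pvGroups g (l :: ls) = pvGroups (g.1, g.2 ++ [l]) ls := by
        rw [pvGroups, if_neg hh]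
      rw [this]

-- bridge A: the loop over the raw lines is the core loop over the stripped non-empty lines
theorem parseA_foldl (lines0 : List (List Char)) (init : List (List Char) × List Char) :
    lines0.foldl parseStepA init =
      ((lines0.map PySem.Chars.strip).filter (fun x => decide (x ≠ []))).foldl
        (fun st l =>
          if pvIsHeader l then
            ((if st.2 ≠ [] then st.1 ++ [PySem.Chars.strip st.2] else st.1),
             if 1 < (PySem.Chars.splitOnMax l ['.'] 1).length then
               PySem.Chars.strip ((PySem.Chars.splitOnMax l ['.'] 1).getD 1 [])
             else [])
          else (st.1, st.2 ++ (' ' :: l))) init := by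
  rw [← PySem.List.foldl_ite_eq_foldl_filter (fun l => l ≠ []), List.foldl_map]
  apply PySem.List.foldl_congr_mem
  intro st l _
  show parseStepA st l = _
  unfold parseStepA
  by_cases h : PySem.Chars.strip l = []
  · simp [h]
  · simp only [h, if_false, ite_not]
    split_ifs <;> rfl

-- bridge B: goB renders one pvRender-group per header segment
theorem join_ne_nil (q : List Char) (conts : List (List Char)) (hq : q ≠ []) :
    PySem.Chars.join [' '] (q :: conts) ≠ [] := by
  rw [join_cons]
  simp [hq]

theorem filter_singleton_ne (p : List Char) :
    ([p].filter (fun x => x ≠ [])) = (if p ≠ [] then [p] else []) := by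
  by_cases hp : p = [] <;> simp [hp]

theorem cap_guard (p : List Char) (conts : List (List Char)) (hc : ∀ c ∈ conts, c ≠ []) :
    (if PySem.Chars.join [' '] ((if p ≠ [] then [p] else []) ++ conts) ≠ [] then
       [PySem.Chars.join [' '] ((if p ≠ [] then [p] else []) ++ conts)] else [])
      = pvRender [(p, conts)] := by
  have hparts : pvParts (p, conts) = (if p ≠ [] then [p] else []) ++ conts := rfl
  cases hps : (if p ≠ [] then [p] else []) ++ conts with
  | nil =>
    have h0 : pvParts (p, conts) = [] := by rw [hparts, hps]
    simp [pvRender, h0, PySem.Chars.join_nil]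
  | cons q rest =>
    have hq : q ≠ [] := by
      by_cases hp : p = []
      · simp [hp] at hps
        exact hc q (by rw [hps]; simp)
      · simp [hp] at hps
        rw [← hps.1]; exact hp
    have h1 : pvParts (p, conts) = q :: rest := by rw [hparts, hps]
    have hj := join_ne_nil q rest hq
    rw [if_pos hj]
    simp [pvRender, h1]

-- the defining equation of goB on a cons
theorem goB_cons (first : List Char) (rest0 : List (List Char)) :
    goB (first :: rest0) =
      (if PySem.Chars.join [' ']
          ((((if pvIsHeader first then [pvPrefix first] else [first]).filter (fun p => p ≠ [])) ++
            rest0.takeWhile (fun l => !pvIsHeader l))) ≠ [] then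
        [PySem.Chars.join [' ']
          ((((if pvIsHeader first then [pvPrefix first] else [first]).filter (fun p => p ≠ [])) ++
            rest0.takeWhile (fun l => !pvIsHeader l)))] else []) ++
      goB (rest0.dropWhile (fun l => !pvIsHeader l)) := by
  rw [goB]

theorem goB_cons' (first : List Char) (rest0 : List (List Char)) (hne : ∀ c ∈ rest0, c ≠ []) :
    goB (first :: rest0) =
      pvRender [((if pvIsHeader first then pvPrefix first else first),
                 rest0.takeWhile (fun l => !pvIsHeader l))] ++
      goB (rest0.dropWhile (fun l => !pvIsHeader l)) := by
  rw [goB_cons]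
  have hcts : ∀ c ∈ rest0.takeWhile (fun l => !pvIsHeader l), c ≠ [] :=
    fun c hcm => hne c ((List.takeWhile_sublist _).subset hcm)
  by_cases hh : pvIsHeader first = true
  · rw [if_pos hh, filter_singleton_ne, cap_guard _ _ hcts, hh]
    simp
  · rw [if_neg hh, filter_singleton_ne, cap_guard _ _ hcts]
    simp [hh]

theorem groups_go (L : List (List Char)) (hL : ∀ l ∈ L, l ≠ []) :
    ∀ g : List Char × List (List Char),
      pvRender (pvGroups g L)
        = pvRender [(g.1, g.2 ++ L.takeWhile (fun l => !pvIsHeader l))] ++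
          goB (L.dropWhile (fun l => !pvIsHeader l)) := by
  induction L with
  | nil =>
    intro g
    simp [pvGroups, goB]
  | cons l ls ih =>
    intro g
    have hL' : ∀ x ∈ ls, x ≠ [] := fun x hx => hL x (by simp [hx])
    by_cases hh : pvIsHeader l = true
    · rw [pvGroups, if_pos hh, render_cons]
      rw [ih hL' (pvPrefix l, [])]
      rw [List.takeWhile_cons, List.dropWhile_cons]
      simp only [hh, Bool.not_true, Bool.false_eq_true, if_false]
      rw [goB_cons' l ls hL', if_pos hh]
      simp
    · rw [pvGroups, if_neg hh, ih hL' (g.1, g.2 ++ [l])]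
      rw [List.takeWhile_cons, List.dropWhile_cons]
      simp only [hh, Bool.not_false, if_true]
      simp [List.append_assoc]

theorem goB_start (L : List (List Char)) (hL : ∀ l ∈ L, l ≠ []) :
    goB L = pvRender [(([] : List Char), L.takeWhile (fun l => !pvIsHeader l))] ++
      goB (L.dropWhile (fun l => !pvIsHeader l)) := by
  cases L with
  | nil => simp [goB, pvRender, pvParts]
  | cons l ls =>
    have hL' : ∀ x ∈ ls, x ≠ [] := fun x hx => hL x (by simp [hx])
    have hlne : l ≠ [] := hL l (by simp)
    rw [List.takeWhile_cons, List.dropWhile_cons]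
    by_cases hh : pvIsHeader l = true
    · simp only [hh, Bool.not_true, Bool.false_eq_true, if_false]
      simp [pvRender, pvParts]
    · simp only [hh, Bool.not_false, if_true]
      rw [goB_cons' l ls hL', if_neg hh]
      simp [pvRender, pvParts, hlne]

theorem parse_eq (generated_text : String) (sample : List (String × List (String × List String))) :
    parse generated_text sample = parse_alt generated_text sample := by
  have hdef : parse generated_text sample =
      pvAlign (pvFinish ((PySem.Chars.splitOn (PySem.Chars.strip generated_text.toList) ['\n']).foldl
        parseStepA ([], []))) sample := rfl
  rw [hdef, parseA_foldl]
  set L := (((PySem.Chars.splitOn (PySem.Chars.strip generated_text.toList) ['\n']).map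
      PySem.Chars.strip).filter (fun x => decide (x ≠ []))) with hLdef
  have hclean : ∀ l ∈ L, pvCleanP l := by
    intro l hl
    rw [hLdef] at hl
    have h2 := List.of_mem_filter hl
    have h1 := List.mem_of_mem_filter hl
    obtain ⟨x, -, rfl⟩ := List.mem_map.mp h1
    rcases strip_clean1 x with h | h
    · simp [h] at h2
    · exact h
  have hne : ∀ l ∈ L, l ≠ [] := fun l hl => (hclean l hl).1
  have hA : pvFinish (L.foldl (fun st l =>
        if pvIsHeader l then
          ((if st.2 ≠ [] then st.1 ++ [PySem.Chars.strip st.2] else st.1),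
           if 1 < (PySem.Chars.splitOnMax l ['.'] 1).length then
             PySem.Chars.strip ((PySem.Chars.splitOnMax l ['.'] 1).getD 1 [])
           else [])
        else (st.1, st.2 ++ (' ' :: l))) ([], [])) = [] ++ pvRender (pvGroups ([], []) L) :=
    main_inv L hclean [] ([], []) (Or.inl rfl) (by simp)
  rw [hA]
  have hB0 : parse_alt generated_text sample = pvAlign (goB L) sample := rfl
  rw [hB0]
  have hgo : goB L = pvRender (pvGroups ([], []) L) := by
    rw [goB_start L hne, groups_go L hne ([], [])]
    simp
  rw [hgo]
  simp

-- ===== VERDICT (by name: the statement is the Claim_ definition above) =====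
theorem parse_spec : Claim_equal_parse := by
  intro t s _
  unfold Spec_parse
  exact parse_eq t s
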